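-- pv_equiv track=rewrite | github.com/RokShox/Nexa | src/nexa/mcnp/input/cardFILL.py | _compress_assignments
-- ===== SOURCE A (Python) =====
-- from typing import List, Optional, Union, TextIO, Dict, Tuple, Any
--
-- def _compress_assignments(assignment_list: List[int]) -> List[str]:
--     """
--     Compress consecutive identical assignments using jump notation.
--
--     Args:
--         assignment_list: List of universe assignments
--
--     Returns:
--         List of strings with jump notation
--     """
--     if not assignment_list:
--         return []
--
--     result = []
--     i = 0
--
--     while i < len(assignment_list):
--         current_universe = assignment_list[i]
--
--         # Count consecutive identical assignments
--         count = 1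
--         while (i + count < len(assignment_list) and
--                assignment_list[i + count] == current_universe):
--             count += 1
--
--         # Add entry with repeat notation if needed
--         if current_universe == 0:
--             # Use jump notation for non-filled cells
--             if count == 1:
--                 result.append("J")
--             else:
--                 result.append(f"{count}J")
--         else:
--             # Regular universe number
--             if count == 1:
--                 result.append(str(current_universe))
--             else:
--                 result.append(f"{count}R {current_universe}")
--
--         i += count
--
--     return result
-- ===== SOURCE B (Python) =====
-- from typing import List
--
-- def _compress_assignments(assignment_list: List[int]) -> List[str]:
--     """Single left-to-right pass carrying a pending (value, count) run; no index arithmetic."""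
--     def fmt(v, c):
--         if v == 0:
--             return "J" if c == 1 else f"{c}J"
--         return str(v) if c == 1 else f"{c}R {v}"
--
--     result = []
--     pending = None  # (value, count) of the run being accumulated
--     for v in assignment_list:
--         if pending is not None and pending[0] == v:
--             pending = (v, pending[1] + 1)
--         else:
--             if pending is not None:
--                 result.append(fmt(pending[0], pending[1]))
--             pending = (v, 1)
--     if pending is not None:
--         result.append(fmt(pending[0], pending[1]))
--     return result
-- ===== Notes on version B (the rewrite author's own statement) =====
-- stated objective: alternative
-- what changed: Replaced the index-based outer while loop with a nested look-ahead inner while by a single element-wise pass that folds over the list carrying a pending (value, count) run and flushes it when the value changes or at the end.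
import Mathlib
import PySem

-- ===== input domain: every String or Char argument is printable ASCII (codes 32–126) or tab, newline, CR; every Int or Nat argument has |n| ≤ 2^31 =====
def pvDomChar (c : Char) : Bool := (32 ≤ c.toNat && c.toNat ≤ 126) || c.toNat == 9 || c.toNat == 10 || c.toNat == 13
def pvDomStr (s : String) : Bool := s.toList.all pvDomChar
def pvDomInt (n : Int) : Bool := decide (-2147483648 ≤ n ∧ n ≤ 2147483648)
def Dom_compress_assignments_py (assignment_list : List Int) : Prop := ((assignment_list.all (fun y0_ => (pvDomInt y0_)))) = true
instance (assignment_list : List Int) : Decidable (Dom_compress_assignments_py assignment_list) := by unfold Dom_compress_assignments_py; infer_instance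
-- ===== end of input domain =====

-- B replaces A's index-based outer loop with nested look-ahead scan by one element-wise pass carrying a pending (value,count) run (alternative decomposition, same cost).

-- ===== PORT A =====
-- inner `while` of A: counts consecutive elements equal to v starting at position i+count
def pvAInner (l : List Int) (i : Nat) (v : Int) (count : Nat) : Nat :=
  if i + count < l.length ∧ l[i + count]! = v then pvAInner l i v (count + 1) else count
  termination_by l.length - (i + count)
  decreasing_by omega

theorem pvAInner_ge (l : List Int) (i : Nat) (v : Int) (count : Nat) :
    count ≤ pvAInner l i v count := by
  unfold pvAInner
  split
  · exact le_trans (Nat.le_succ _) (pvAInner_ge l i v (count + 1))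
  · exact le_refl _

  termination_by l.length - (i + count)
  decreasing_by omega

-- outer `while` of A
def pvAOuter (l : List Int) (i : Nat) : List String :=
  if h : i < l.length then
    let v := l[i]!
    let count := pvAInner l i v 1
    let entry :=
      if v = 0 then (if count = 1 then "J" else toString count ++ "J")
      else (if count = 1 then PySem.Int.toStr v else toString count ++ "R " ++ PySem.Int.toStr v)
    entry :: pvAOuter l (i + count)
  else []
  termination_by l.length - i
  decreasing_by
    have := pvAInner_ge l i (l[i]!) 1; omega

def compress_assignments_py (assignment_list : List Int) : List String :=
  if assignment_list = [] then [] else pvAOuter assignment_list 0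

-- ===== PORT B =====
def pvFmt (v : Int) (c : Nat) : String :=
  if v = 0 then (if c = 1 then "J" else toString c ++ "J")
  else (if c = 1 then PySem.Int.toStr v else toString c ++ "R " ++ PySem.Int.toStr v)

def pvStep (st : List String × Option (Int × Nat)) (v : Int) : List String × Option (Int × Nat) :=
  match st.2 with
  | some (pv, pc) =>
    if pv = v then (st.1, some (v, pc + 1)) else (st.1 ++ [pvFmt pv pc], some (v, 1))
  | none => (st.1, some (v, 1))

def compress_assignments_py_alt (assignment_list : List Int) : List String :=
  let st := assignment_list.foldl pvStep ([], none)
  match st.2 with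
  | some (pv, pc) => st.1 ++ [pvFmt pv pc]
  | none => st.1

-- ===== PRECONDITION & SPEC =====
def Spec_compress_assignments_py (assignment_list : List Int) (out : List String) : Prop := out = compress_assignments_py_alt assignment_list
instance (assignment_list : List Int) (out : List String) : Decidable (Spec_compress_assignments_py assignment_list out) := by unfold Spec_compress_assignments_py; infer_instance

-- ===== CLAIM (what is proved, stated in full; the proofs are below) =====
def Claim_equal_compress_assignments_py : Prop := ∀ (assignment_list : List Int), Dom_compress_assignments_py assignment_list → Spec_compress_assignments_py assignment_list (compress_assignments_py assignment_list)

-- ===== LEMMAS AND PROOFS =====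

-- common run-length specification, recursive on the list
def pvSpec : List Int → List String
  | [] => []
  | v :: rest =>
    pvFmt v (1 + (rest.takeWhile (· = v)).length) :: pvSpec (rest.dropWhile (· = v))
  termination_by l => l.length
  decreasing_by
    simp only [List.length_cons]
    exact Nat.lt_succ_of_le (List.length_dropWhile_le _ _)

theorem pvDropWhile_eq_drop (p : Int → Bool) (l : List Int) :
    l.dropWhile p = l.drop (l.takeWhile p).length := by
  conv_lhs => rw [show l.dropWhile p = ((l.takeWhile p ++ l.dropWhile p).drop (l.takeWhile p).length) from (List.drop_left (l₁ := l.takeWhile p) (l₂ := l.dropWhile p)).symm]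
  rw [List.takeWhile_append_dropWhile]

theorem pvAInner_eq (l : List Int) (i : Nat) (v : Int) (count : Nat) :
    pvAInner l i v count = count + ((l.drop (i + count)).takeWhile (· = v)).length := by
  unfold pvAInner
  split
  · next h =>
    obtain ⟨hlt, hv⟩ := h
    rw [pvAInner_eq l i v (count + 1), ← Nat.add_assoc]
    have hd : l.drop (i + count) = l[i + count] :: l.drop (i + count + 1) :=
      List.drop_eq_getElem_cons hlt
    rw [hd, List.takeWhile_cons]
    simp only [getElem!_pos l (i + count) hlt] at hv
    simp [hv]
    omega
  · next h =>
    rcases Nat.lt_or_ge (i + count) l.length with hlt | hge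
    · have hv : ¬ l[i + count]! = v := fun hv => h ⟨hlt, hv⟩
      have hd : l.drop (i + count) = l[i + count] :: l.drop (i + count + 1) :=
        List.drop_eq_getElem_cons hlt
      rw [hd, List.takeWhile_cons]
      simp only [getElem!_pos l (i + count) hlt] at hv
      simp [hv]
    · rw [List.drop_eq_nil_of_le hge]
      simp
  termination_by l.length - (i + count)
  decreasing_by omega

theorem pvAOuter_eq (l : List Int) (i : Nat) : pvAOuter l i = pvSpec (l.drop i) := by
  unfold pvAOuter
  split
  · next h =>
    dsimp only
    have hd : l.drop i = l[i] :: l.drop (i + 1) := List.drop_eq_getElem_cons h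
    have hv : l[i]! = l[i] := getElem!_pos l i h
    have hcount : pvAInner l i (l[i]!) 1 = 1 + ((l.drop (i + 1)).takeWhile (· = l[i])).length := by
      rw [pvAInner_eq, hv]
    rw [pvAOuter_eq l (i + pvAInner l i (l[i]!) 1)]
    rw [hd]
    simp only [pvSpec]
    rw [hcount, hv]
    unfold pvFmt
    congr 2
    rw [pvDropWhile_eq_drop, List.drop_drop]
    congr 1
    omega
  · next h =>
    rw [List.drop_eq_nil_of_le (by omega)]
    simp [pvSpec]
  termination_by l.length - i
  decreasing_by
    have := pvAInner_ge l i (l[i]!) 1; omega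

theorem pvFoldFlush (l : List Int) (acc : List String) (pv : Int) (pc : Nat) :
    (match (l.foldl pvStep (acc, some (pv, pc))).2 with
     | some (qv, qc) => (l.foldl pvStep (acc, some (pv, pc))).1 ++ [pvFmt qv qc]
     | none => (l.foldl pvStep (acc, some (pv, pc))).1)
    = acc ++ pvFmt pv (pc + (l.takeWhile (· = pv)).length) :: pvSpec (l.dropWhile (· = pv)) := by
  induction l generalizing acc pv pc with
  | nil => simp [pvSpec]
  | cons v t ih =>
    by_cases hv : v = pv
    · subst hv
      simp only [List.foldl_cons, pvStep, if_true]
      rw [ih]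
      have h1 : (v :: t).takeWhile (· = v) = v :: t.takeWhile (· = v) := by
        simp
      have h2 : (v :: t).dropWhile (· = v) = t.dropWhile (· = v) := by
        simp
      rw [h1, h2, List.length_cons,
        show pc + ((t.takeWhile (· = v)).length + 1) = pc + 1 + (t.takeWhile (· = v)).length from by omega]
    · have hne : ¬ (pv = v) := fun hh => hv hh.symm
      simp only [List.foldl_cons, pvStep, if_neg hne]
      rw [ih]
      have hvd : (decide (v = pv)) = false := by simp [hv]
      simp only [List.takeWhile_cons, List.dropWhile_cons, hvd]
      simp [pvSpec]

theorem pvAlt_eq (l : List Int) : compress_assignments_py_alt l = pvSpec l := by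
  cases l with
  | nil => simp [compress_assignments_py_alt, pvSpec]
  | cons v t =>
    unfold compress_assignments_py_alt
    simp only [List.foldl_cons, pvStep]
    have := pvFoldFlush t [] v 1
    simp only [List.nil_append] at this
    rw [this]
    simp [pvSpec]

-- ===== VERDICT (by name: the statement is the Claim_ definition above) =====
theorem compress_assignments_py_spec : Claim_equal_compress_assignments_py := by
  intro l _
  unfold Spec_compress_assignments_py
  rw [pvAlt_eq]
  unfold compress_assignments_py
  split
  · next h => subst h; simp [pvSpec]
  · rw [pvAOuter_eq]; simp
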